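-- pv_equiv track=rewrite | github.com/zoohee/coding-test-study | PGS/Lv3/숫자게임.py | solution
-- ===== SOURCE A (Python) =====
-- def solution(A, B):
--     answer = 0
--     A.sort(reverse=True)
--     B.sort(reverse=True)
--     check = 0
--     for i in range(len(B)):
--         for j in range(check, len(B)):
--             if B[i] > A[j]:
--                 answer += 1
--                 check = j+1
--                 break
--         if j==len(B)-1:
--             return answer
--
--     return answer
-- ===== SOURCE B (Python) =====
-- def solution(A, B):
--     # Ballot-style sweep: no matching loop at all. Sort both in place (as A does),
--     # encode the n relevant A values and all B values as events ordered descending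
--     # (an A value ties before an equal B value, so a B wins only strictly), walk
--     # the event list counting B as +1 and A as -1, and read the answer off the
--     # minimum prefix sum: answer = n + min(0, min prefix sum).
--     A.sort(reverse=True)
--     B.sort(reverse=True)
--     n = len(B)
--     events = sorted([2 * a + 1 for a in A[:n]] + [2 * b for b in B], reverse=True)
--     s = 0
--     m = 0
--     for e in events:
--         s += -1 if e % 2 else 1
--         if s < m:
--             m = s
--     return n + m
-- ===== Notes on version B (the rewrite author's own statement) =====
-- stated objective: alternative
-- what changed: Replaces A's greedy matching (nested for/for with break, stale inner index sentinel, mid-loop return) by a ballot-style sweep with no matching at all: the n relevant A values and the B values are encoded as one descending event list and the answer is read off a closed form, n plus the minimum prefix sum of a +1/-1 walk over the events.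
import Mathlib
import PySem

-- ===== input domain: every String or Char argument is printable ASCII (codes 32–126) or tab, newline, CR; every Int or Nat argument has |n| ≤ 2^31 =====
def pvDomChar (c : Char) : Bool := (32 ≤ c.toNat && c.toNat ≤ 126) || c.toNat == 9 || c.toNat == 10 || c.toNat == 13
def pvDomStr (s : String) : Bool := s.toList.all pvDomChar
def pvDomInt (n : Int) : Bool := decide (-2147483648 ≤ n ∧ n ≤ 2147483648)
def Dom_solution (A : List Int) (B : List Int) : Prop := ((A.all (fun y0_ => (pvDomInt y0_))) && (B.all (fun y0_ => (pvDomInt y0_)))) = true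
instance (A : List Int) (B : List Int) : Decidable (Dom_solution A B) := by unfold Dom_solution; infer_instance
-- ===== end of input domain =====

-- B replaces A's greedy matching loops by a ballot-style sweep: the relevant values are
-- encoded as one descending event list and the answer is a closed form, n plus the
-- minimum prefix sum of a +1/-1 walk (objective: alternative algorithm).
-- Both Pythons sort A and B in place (observable mutation); the equivalence proved here is
-- about the RETURN value only.

-- ===== PORT A =====
-- inner 'for j in range(check, len(B)): if B[i] > A[j]: … break': first j with b > A[j].
-- The A[j] access is in range under Pre_solution (len(B) ≤ len(A)), so pyGetD's default is unreachable there.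
def pvInnerA (As : List Int) (b : Int) : List Int → Option Int
  | [] => none
  | j :: js => if b > PySem.List.pyGetD As j 0 then some j else pvInnerA As b js

-- outer loop; state: answer, check, and the leftover Python variable j from the previous inner loop
def pvOuterA (As : List Int) (Bs : List Int) (n : Int) : List Int → Int → Int → Int → Int
  | [], answer, _check, _jprev => answer
  | i :: is, answer, check, jprev =>
    let js := PySem.List.pyRange check n 1
    match pvInnerA As (PySem.List.pyGetD Bs i 0) js with
    | some j =>                       -- break with a win: answer += 1, check = j+1
      if j == n - 1 then answer + 1   -- 'if j==len(B)-1: return answer'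
      else pvOuterA As Bs n is (answer + 1) (j + 1) j
    | none =>                         -- inner loop exhausted (or empty: j keeps its old value)
      let j := js.getLast?.getD jprev
      if j == n - 1 then answer else pvOuterA As Bs n is answer check j

def solution (A : List Int) (B : List Int) : Int :=
  let As := PySem.List.sorted A (fun x => x) true
  let Bs := PySem.List.sorted B (fun x => x) true
  pvOuterA As Bs (PySem.List.len Bs) (PySem.List.pyRange 0 (PySem.List.len Bs) 1) 0 0 0

-- ===== PORT B =====
-- events = sorted([2*a+1 for a in A[:n]] + [2*b for b in B], reverse=True)
-- then a single walk: s += -1 if e % 2 else 1, tracking the minimum m; return n + m.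
def solution_alt (A : List Int) (B : List Int) : Int :=
  let As := PySem.List.sorted A (fun x => x) true
  let Bs := PySem.List.sorted B (fun x => x) true
  let n := PySem.List.len Bs
  let events := PySem.List.sorted
    ((PySem.List.slice As none (some n)).map (fun a => 2 * a + 1) ++ Bs.map (fun b => 2 * b))
    (fun x => x) true
  let sm := events.foldl
    (fun (sm : Int × Int) e =>
      let s := sm.1 + (if PySem.Int.mod e 2 ≠ 0 then -1 else 1)
      (s, if s < sm.2 then s else sm.2)) (0, 0)
  n + sm.2

-- ===== PRECONDITION & SPEC =====
-- A indexes A[j] for j up to len(B)-1: whenever len(B) > len(A) the Python A reaches an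
-- out-of-range access and raises IndexError (it never returns there), so exactly those
-- inputs are excluded.
def Pre_solution (A : List Int) (B : List Int) : Prop := B.length ≤ A.length
instance (A : List Int) (B : List Int) : Decidable (Pre_solution A B) := by unfold Pre_solution; infer_instance
def pvWitness_solution : List Int × List Int := ([3, 1], [2])

def Spec_solution (A : List Int) (B : List Int) (out : Int) : Prop := out = solution_alt A B
instance (A : List Int) (B : List Int) (out : Int) : Decidable (Spec_solution A B out) := by unfold Spec_solution; infer_instance

-- ===== CLAIM (what is proved, stated in full; the proofs are below) =====
def Claim_equal_solution : Prop := ∀ (A : List Int) (B : List Int), Dom_solution A B → Pre_solution A B → Spec_solution A B (solution A B)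

-- ===== LEMMAS AND PROOFS =====

-- ---- proof-layer helpers: the pointer greedy A's loops amount to ----
-- 'while c < n and b <= A[c]: c += 1'
def pvAdvance (As : List Int) (n : Int) (b : Int) (c : Int) : Int :=
  if c < n ∧ b ≤ PySem.List.pyGetD As c 0 then pvAdvance As n b (c + 1) else c
termination_by (n - c).toNat
decreasing_by omega

def pvLoopB (As : List Int) (n : Int) : List Int → Int → Int → Int
  | [], answer, _c => answer
  | b :: bs, answer, c =>
    let c' := pvAdvance As n b c
    if c' ≥ n then answer else pvLoopB As n bs (answer + 1) (c' + 1)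

-- recursive greedy on the two descending lists
def pvG : List Int → List Int → Int
  | _, [] => 0
  | [], _ :: _ => 0
  | a :: as, b :: bs => if a < b then 1 + pvG as bs else pvG as (b :: bs)
termination_by as bs => as.length + bs.length

-- sweep with a pending-wildcard counter, fused with the merge of the two lists
def pvM : List Int → List Int → Int → Int
  | [], _, _ => 0
  | _ :: as, [], p => if 0 < p then 1 + pvM as [] (p - 1) else 0
  | a :: as, b :: bs, p =>
    if b ≤ a then (if 0 < p then 1 + pvM as (b :: bs) (p - 1) else pvM as (b :: bs) 0)
    else pvM (a :: as) bs (p + 1)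
termination_by as bs _ => as.length + bs.length

-- the encoded merged event list (A value a ↦ 2a+1, B value b ↦ 2b, descending, A first on ties)
def pvMerge : List Int → List Int → List Int
  | [], bs => bs.map (fun b => 2 * b)
  | a :: as, [] => (2 * a + 1) :: pvMerge as []
  | a :: as, b :: bs =>
    if b ≤ a then (2 * a + 1) :: pvMerge as (b :: bs) else (2 * b) :: pvMerge (a :: as) bs
termination_by as bs => as.length + bs.length

-- minimum prefix sum (including the empty prefix) of the ±1 walk over an event list
def pvMp : List Int → Int
  | [] => 0
  | e :: l => min 0 ((if PySem.Int.mod e 2 ≠ 0 then -1 else 1) + pvMp l)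

-- ---- A's inner for-loop over range(check,n) finds exactly the index where the pointer stops ----
theorem pvAdvance_spec (As : List Int) (n b : Int) :
    ∀ c, c ≤ n →
      c ≤ pvAdvance As n b c ∧ pvAdvance As n b c ≤ n ∧
      pvInnerA As b (PySem.List.pyRange c n 1) =
        (if pvAdvance As n b c < n then some (pvAdvance As n b c) else none) := by
  have key : ∀ (k : Nat) (c : Int), (n - c).toNat = k → c ≤ n →
      c ≤ pvAdvance As n b c ∧ pvAdvance As n b c ≤ n ∧
      pvInnerA As b (PySem.List.pyRange c n 1) =
        (if pvAdvance As n b c < n then some (pvAdvance As n b c) else none) := by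
    intro k
    induction k with
    | zero =>
      intro c hk hc
      have hcn : c = n := by omega
      subst hcn
      rw [pvAdvance, if_neg (by omega)]
      refine ⟨le_refl _, le_refl _, ?_⟩
      rw [PySem.List.pyRange_one_eq_nil (le_refl c)]
      simp [pvInnerA]
    | succ k ih =>
      intro c hk hc
      have hlt : c < n := by omega
      rw [PySem.List.pyRange_one_cons hlt]
      by_cases hb : b ≤ PySem.List.pyGetD As c 0
      · rw [pvAdvance, if_pos ⟨hlt, hb⟩]
        obtain ⟨ih1, ih2, ih3⟩ := ih (c + 1) (by omega) (by omega)
        refine ⟨by omega, ih2, ?_⟩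
        rw [pvInnerA, if_neg (by omega), ih3]
      · rw [pvAdvance, if_neg (by intro h; exact hb h.2)]
        refine ⟨le_refl _, le_of_lt hlt, ?_⟩
        rw [pvInnerA, if_pos (by omega), if_pos hlt]
  intro c hc
  exact key (n - c).toNat c rfl hc

theorem pvLoopB_stop (As : List Int) (n : Int) (bs : List Int) (a c : Int) (h : n ≤ c) :
    pvLoopB As n bs a c = a := by
  cases bs with
  | nil => rfl
  | cons b bs =>
    rw [pvLoopB]
    have hadv : pvAdvance As n b c = c := by rw [pvAdvance, if_neg (by omega)]
    rw [hadv, if_pos h]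

theorem pvMain (As Bs : List Int) (n : Int) (hn : n = (Bs.length : Int)) :
    ∀ bs i answer check jprev, 0 ≤ i → i ≤ n → check ≤ n →
      bs = Bs.drop i.toNat → (check = n → jprev = n - 1 ∨ bs = []) →
      pvOuterA As Bs n (PySem.List.pyRange i n 1) answer check jprev =
        pvLoopB As n bs answer check := by
  intro bs
  induction bs with
  | nil =>
    intro i answer check jprev hi0 hin hck hdrop _hinv
    have hlen : Bs.length ≤ i.toNat := List.drop_eq_nil_iff.mp hdrop.symm
    have : i = n := by omega
    subst this
    rw [PySem.List.pyRange_one_eq_nil (le_refl i)]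
    rfl
  | cons b bs' ih =>
    intro i answer check jprev hi0 hin hck hdrop hinv
    have hitn : i.toNat < Bs.length := by
      by_contra hge
      rw [List.drop_eq_nil_of_le (by omega)] at hdrop
      exact List.cons_ne_nil _ _ hdrop
    have hiltn : i < n := by omega
    have hget : PySem.List.pyGetD Bs i 0 = b := by
      rw [PySem.List.pyGetD_eq_getElem Bs 0 hi0 (by omega)]
      have h0 : (List.drop i.toNat Bs).head? = some b := by rw [← hdrop]; rfl
      rw [List.head?_drop, List.getElem?_eq_getElem hitn] at h0
      exact (Option.some.inj h0)
    rw [PySem.List.pyRange_one_cons hiltn, pvOuterA, hget]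
    obtain ⟨h1, h2, h3⟩ := pvAdvance_spec As n b check hck
    by_cases hd : pvAdvance As n b check < n
    · have h3' : pvInnerA As b (PySem.List.pyRange check n 1)
          = some (pvAdvance As n b check) := by rw [h3, if_pos hd]
      simp only [h3']
      have hrhs : pvLoopB As n (b :: bs') answer check
          = pvLoopB As n bs' (answer + 1) (pvAdvance As n b check + 1) := by
        simp only [pvLoopB]
        rw [if_neg (by omega)]
      rw [hrhs]
      by_cases hlast : pvAdvance As n b check = n - 1
      · rw [if_pos (by simp [hlast])]
        rw [pvLoopB_stop As n bs' (answer + 1) _ (by omega)]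
      · rw [if_neg (by simpa using hlast)]
        refine ih (i + 1) (answer + 1) (pvAdvance As n b check + 1)
          (pvAdvance As n b check) (by omega) (by omega) (by omega) ?_ ?_
        · have h1' : (i + 1).toNat = i.toNat + 1 := by omega
          rw [h1', ← List.drop_drop, ← hdrop]
          simp
        · intro hN
          exact Or.inl (by omega)
    · have h3' : pvInnerA As b (PySem.List.pyRange check n 1) = none := by
        rw [h3, if_neg hd]
      simp only [h3']
      have hdn : pvAdvance As n b check = n := by omega
      have hrhs : pvLoopB As n (b :: bs') answer check = answer := by
        simp only [pvLoopB]
        rw [hdn, if_pos (le_refl n)]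
      rw [hrhs]
      by_cases hckn : check < n
      · have hsplit : PySem.List.pyRange check n 1
            = PySem.List.pyRange check (n - 1) 1 ++ [n - 1] := by
          have hs := PySem.List.pyRange_one_succ_right (a := check) (b := n - 1) (by omega)
          simpa using hs
        rw [hsplit]
        simp
      · have hckn' : check = n := by omega
        rcases hinv hckn' with hj | habs
        · rw [PySem.List.pyRange_one_eq_nil (by omega)]
          simp [hj]
        · exact absurd habs (List.cons_ne_nil _ _)


theorem pvMod_odd (a : Int) : PySem.Int.mod (2 * a + 1) 2 = 1 := by
  rw [PySem.Int.mod_eq_emod_of_pos (by norm_num : (0:Int) < 2)]; omega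

theorem pvMod_even (b : Int) : PySem.Int.mod (2 * b) 2 = 0 := by
  rw [PySem.Int.mod_eq_emod_of_pos (by norm_num : (0:Int) < 2)]; omega

-- ---- pointer greedy = recursive greedy ----
theorem pvLoopB_eq_pvG (As : List Int) (n : Int) (hn : n ≤ (As.length : Int)) :
    ∀ bs answer c, 0 ≤ c → c ≤ n →
      pvLoopB As n bs answer c = answer + pvG ((As.take n.toNat).drop c.toNat) bs := by
  intro bs
  induction bs with
  | nil =>
    intro answer c _ _
    simp [pvLoopB, pvG]
  | cons b bs ih =>
    intro answer c hc0 hcn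
    -- the inner while: pvG over the drop is unchanged while the pointer skips
    have skip : ∀ (k : Nat) (c : Int), (n - c).toNat = k → 0 ≤ c → c ≤ n →
        pvG ((As.take n.toNat).drop c.toNat) (b :: bs)
          = pvG ((As.take n.toNat).drop (pvAdvance As n b c).toNat) (b :: bs) ∧
        (pvAdvance As n b c < n → PySem.List.pyGetD As (pvAdvance As n b c) 0 < b) := by
      intro k
      induction k with
      | zero =>
        intro c hk hc0 hcn
        have hcn' : c = n := by omega
        rw [pvAdvance, if_neg (by omega)]
        exact ⟨rfl, by omega⟩
      | succ k ihk =>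
        intro c hk hc0 hcn
        have hlt : c < n := by omega
        by_cases hb : b ≤ PySem.List.pyGetD As c 0
        · rw [pvAdvance, if_pos ⟨hlt, hb⟩]
          obtain ⟨e1, e2⟩ := ihk (c + 1) (by omega) (by omega) (by omega)
          refine ⟨?_, e2⟩
          rw [← e1]
          have hclen : c.toNat < (As.take n.toNat).length := by
            simp only [List.length_take]
            omega
          rw [List.drop_eq_getElem_cons hclen]
          have hgetA : (As.take n.toNat)[c.toNat] = As[c.toNat]'(by omega) :=
            List.getElem_take
          have hpg : PySem.List.pyGetD As c 0 = As[c.toNat]'(by omega) :=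
            PySem.List.pyGetD_eq_getElem As 0 hc0 (by omega)
          rw [pvG, if_neg (by rw [hgetA, ← hpg]; omega)]
          have : c.toNat + 1 = (c + 1).toNat := by omega
          rw [this]
        · rw [pvAdvance, if_neg (by intro h; exact hb h.2)]
          exact ⟨rfl, fun _ => by omega⟩
    obtain ⟨e1, e2⟩ := skip (n - c).toNat c rfl hc0 hcn
    obtain ⟨h1, h2, _⟩ := pvAdvance_spec As n b c hcn
    rw [pvLoopB]
    by_cases hge : pvAdvance As n b c ≥ n
    · rw [if_pos hge]
      have hc' : pvAdvance As n b c = n := by omega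
      rw [e1, hc']
      have : (As.take n.toNat).drop n.toNat = [] := by
        apply List.drop_eq_nil_of_le
        simp only [List.length_take]
        omega
      rw [this]
      simp [pvG]
    · rw [if_neg hge]
      have hlt : pvAdvance As n b c < n := by omega
      have hclen : (pvAdvance As n b c).toNat < (As.take n.toNat).length := by
        simp only [List.length_take]
        omega
      rw [e1, List.drop_eq_getElem_cons hclen]
      have hgetA : (As.take n.toNat)[(pvAdvance As n b c).toNat] =
          As[(pvAdvance As n b c).toNat]'(by omega) := List.getElem_take
      have hpg : PySem.List.pyGetD As (pvAdvance As n b c) 0 =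
          As[(pvAdvance As n b c).toNat]'(by omega) :=
        PySem.List.pyGetD_eq_getElem As 0 (by omega) (by omega)
      rw [pvG, if_pos (by rw [hgetA, ← hpg]; exact e2 hlt)]
      rw [ih (answer + 1) (pvAdvance As n b c + 1) (by omega) (by omega)]
      have : ((pvAdvance As n b c).toNat + 1) = (pvAdvance As n b c + 1).toNat := by omega
      rw [this]
      ring

-- ---- the wildcard-exchange identity ----
theorem pvM_exchange (a : Int) (bs : List Int) :
    ∀ as p, (∀ x ∈ as, x ≤ a) → 0 ≤ p → pvM (a :: as) bs (p + 1) = 1 + pvM as bs p := by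
  induction bs with
  | nil =>
    intro as p _ hp
    simp only [pvM, if_pos (show (0:Int) < p + 1 by omega)]
    norm_num
  | cons b bs ih =>
    intro as p ha hp
    by_cases hba : b ≤ a
    · simp only [pvM, if_pos hba, if_pos (show (0:Int) < p + 1 by omega)]
      have : p + 1 - 1 = p := by omega
      rw [this]
    · simp only [pvM, if_neg hba]
      rw [ih as (p + 1) ha (by omega)]
      congr 1
      cases as with
      | nil => simp [pvM]
      | cons a2 as' =>
        have h2 : ¬ b ≤ a2 := by
          have := ha a2 (by simp)
          omega
        simp only [pvM, if_neg h2]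

-- ---- recursive greedy = sweep ----
theorem pvG_eq_pvM : ∀ (as bs : List Int), as.Pairwise (fun x y => y ≤ x) →
    pvG as bs = pvM as bs 0 := by
  intro as bs
  induction as, bs using pvG.induct with
  | case1 as =>
    intro _
    cases as with
    | nil => simp [pvG, pvM]
    | cons a as => simp [pvG, pvM]
  | case2 b bs =>
    intro _
    simp [pvG, pvM]
  | case3 a as b bs hab ih =>
    intro h
    rw [List.pairwise_cons] at h
    rw [pvG, if_pos hab]
    simp only [pvM, if_neg (show ¬ b ≤ a by omega)]
    rw [show (0:Int) + 1 = 0 + 1 from rfl, pvM_exchange a bs as 0 h.1 (le_refl 0), ih h.2]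
  | case4 a as b bs hab ih =>
    intro h
    rw [List.pairwise_cons] at h
    rw [pvG, if_neg hab]
    simp only [pvM, if_pos (show b ≤ a by omega), if_neg (show ¬ (0:Int) < 0 by omega)]
    exact ih h.2

theorem pvMp_nonpos : ∀ l, pvMp l ≤ 0 := by
  intro l
  cases l with
  | nil => simp [pvMp]
  | cons e l => exact min_le_left _ _

theorem pvMp_allB : ∀ bs : List Int, pvMp (bs.map (fun b => 2 * b)) = 0 := by
  intro bs
  induction bs with
  | nil => rfl
  | cons b bs ih => simp [pvMp, ih]

theorem pvMp_allA : ∀ as : List Int, pvMp (pvMerge as []) = -(as.length : Int) := by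
  intro as
  induction as with
  | nil => simp [pvMerge, pvMp]
  | cons a as ih =>
    rw [pvMerge, pvMp, pvMod_odd]
    have h := pvMp_nonpos (pvMerge as [])
    rw [ih] at h ⊢
    simp only [List.length_cons]
    push_cast
    omega

-- ---- sweep = closed form over the merged walk ----
theorem pvM_eq_mp : ∀ (as bs : List Int) (p : Int), 0 ≤ p →
    pvM as bs p = (as.length : Int) + min 0 (p + pvMp (pvMerge as bs)) := by
  intro as bs
  induction as, bs using pvMerge.induct with
  | case1 bs =>
    intro p hp
    simp only [pvMerge]
    rw [pvMp_allB]
    simp [pvM]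
    omega
  | case2 a as ih =>
    intro p hp
    have hmp := pvMp_nonpos (pvMerge as [])
    rw [pvMerge, pvMp, pvMod_odd]
    simp only [pvM, List.length_cons]
    by_cases hP : 0 < p
    · rw [if_pos hP, ih (p - 1) (by omega)]
      push_cast
      omega
    · rw [if_neg hP]
      have := pvMp_allA as
      push_cast
      omega
  | case3 a as b bs hba ih =>
    intro p hp
    have hmp := pvMp_nonpos (pvMerge as (b :: bs))
    rw [pvMerge, if_pos hba, pvMp, pvMod_odd]
    simp only [pvM, if_pos hba, List.length_cons]
    by_cases hP : 0 < p
    · rw [if_pos hP, ih (p - 1) (by omega)]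
      push_cast
      omega
    · have hp0 : p = 0 := by omega
      rw [if_neg hP, ih 0 (le_refl 0), hp0]
      push_cast
      omega
  | case4 a as b bs hba ih =>
    intro p hp
    have hmp := pvMp_nonpos (pvMerge (a :: as) bs)
    rw [pvMerge, if_neg hba, pvMp, pvMod_even]
    simp only [pvM, if_neg hba]
    rw [ih (p + 1) (by omega)]
    simp only [List.length_cons]
    push_cast
    omega

-- ---- the sorted event list is the merge ----
theorem pvMerge_perm (as bs : List Int) :
    (pvMerge as bs).Perm (as.map (fun a => 2 * a + 1) ++ bs.map (fun b => 2 * b)) := by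
  induction as, bs using pvMerge.induct with
  | case1 bs => simp [pvMerge]
  | case2 a as ih =>
    rw [pvMerge]
    simpa using ih.cons (2 * a + 1)
  | case3 a as b bs hba ih =>
    rw [pvMerge, if_pos hba]
    simpa using ih.cons (2 * a + 1)
  | case4 a as b bs hba ih =>
    rw [pvMerge, if_neg hba]
    exact (ih.cons (2 * b)).trans List.perm_middle.symm

theorem pvMerge_pairwise : ∀ (as bs : List Int), as.Pairwise (fun x y => y ≤ x) →
    bs.Pairwise (fun x y => y ≤ x) → (pvMerge as bs).Pairwise (fun x y => y ≤ x) := by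
  intro as bs
  induction as, bs using pvMerge.induct with
  | case1 bs =>
    intro _ hb
    simp only [pvMerge]
    exact hb.map _ (fun x y h => by omega)
  | case2 a as ih =>
    intro ha _
    rw [List.pairwise_cons] at ha
    rw [pvMerge, List.pairwise_cons]
    refine ⟨?_, ih ha.2 List.Pairwise.nil⟩
    intro x hx
    have hx' := (pvMerge_perm as []).mem_iff.mp hx
    rw [List.mem_append] at hx'
    have hx'' : x ∈ List.map (fun a => 2 * a + 1) as := by
      rcases hx' with h | h
      · exact h
      · simp at h
    rw [List.mem_map] at hx''
    obtain ⟨a', ha', rfl⟩ := hx''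
    have := ha.1 a' ha'
    omega
  | case3 a as b bs hba ih =>
    intro ha hb
    rw [List.pairwise_cons] at ha
    rw [pvMerge, if_pos hba, List.pairwise_cons]
    refine ⟨?_, ih ha.2 hb⟩
    intro x hx
    have hx' := (pvMerge_perm as (b :: bs)).mem_iff.mp hx
    rw [List.mem_append] at hx'
    rcases hx' with hx' | hx'
    · rw [List.mem_map] at hx'
      obtain ⟨a', ha', rfl⟩ := hx'
      have := ha.1 a' ha'
      omega
    · rw [List.mem_map] at hx'
      obtain ⟨b', hb', rfl⟩ := hx'
      rw [List.pairwise_cons] at hb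
      rcases List.mem_cons.mp hb' with rfl | hb''
      · omega
      · have := hb.1 b' hb''
        omega
  | case4 a as b bs hba ih =>
    intro ha hb
    rw [List.pairwise_cons] at hb
    rw [pvMerge, if_neg hba, List.pairwise_cons]
    refine ⟨?_, ih ha hb.2⟩
    intro x hx
    have hx' := (pvMerge_perm (a :: as) bs).mem_iff.mp hx
    rw [List.mem_append] at hx'
    rcases hx' with hx' | hx'
    · rw [List.mem_map] at hx'
      obtain ⟨a', ha', rfl⟩ := hx'
      rw [List.pairwise_cons] at ha
      rcases List.mem_cons.mp ha' with rfl | ha''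
      · omega
      · have := ha.1 a' ha''
        omega
    · rw [List.mem_map] at hx'
      obtain ⟨b', hb', rfl⟩ := hx'
      have := hb.1 b' hb'
      omega

theorem pvSorted_eq_merge (as bs : List Int) (ha : as.Pairwise (fun x y => y ≤ x))
    (hb : bs.Pairwise (fun x y => y ≤ x)) :
    PySem.List.sorted (as.map (fun a => 2 * a + 1) ++ bs.map (fun b => 2 * b)) (fun x => x) true
      = pvMerge as bs := by
  refine List.Perm.eq_of_pairwise (fun x y _ _ u v => le_antisymm v u) ?_
    (pvMerge_pairwise as bs ha hb) ?_
  · have h := PySem.List.sorted_pairwise_rev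
      (xs := as.map (fun a => 2 * a + 1) ++ bs.map (fun b => 2 * b))
      (key := fun x => x)
    exact h
  · exact (PySem.List.sorted_perm _ _ _).trans (pvMerge_perm as bs).symm

-- ---- the fold in solution_alt computes pvMp ----
theorem pvFold_mp : ∀ (l : List Int) (s m : Int), m ≤ s →
    (l.foldl (fun (sm : Int × Int) e =>
        (sm.1 + (if PySem.Int.mod e 2 ≠ 0 then -1 else 1),
         if sm.1 + (if PySem.Int.mod e 2 ≠ 0 then -1 else 1) < sm.2
           then sm.1 + (if PySem.Int.mod e 2 ≠ 0 then -1 else 1) else sm.2)) (s, m)).2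
      = min m (s + pvMp l) := by
  intro l
  induction l with
  | nil =>
    intro s m hms
    simp [pvMp]
    omega
  | cons e l ih =>
    intro s m hms
    have hmp := pvMp_nonpos l
    rw [List.foldl_cons]
    rw [ih _ _ (by dsimp only; split_ifs <;> omega), pvMp]
    split_ifs <;> omega

-- ===== VERDICT (by name: the statement is the Claim_ definition above) =====
theorem solution_spec : Claim_equal_solution := by
  unfold Claim_equal_solution
  intro A B _hDom hPre
  unfold Pre_solution at hPre
  unfold Spec_solution solution solution_alt
  simp only [PySem.List.len_eq]
  set As := PySem.List.sorted A (fun x => x) true with hAs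
  set Bs := PySem.List.sorted B (fun x => x) true with hBs
  set n : Int := (Bs.length : Int) with hn
  have hlenA : As.length = A.length := by rw [hAs, PySem.List.length_sorted]
  have hlenB : Bs.length = B.length := by rw [hBs, PySem.List.length_sorted]
  have hnA : n ≤ (As.length : Int) := by rw [hn, hlenA, hlenB]; exact_mod_cast hPre
  have hL : pvOuterA As Bs n (PySem.List.pyRange 0 n 1) 0 0 0 = pvLoopB As n Bs 0 0 := by
    refine pvMain As Bs n rfl Bs 0 0 0 0 (le_refl 0) (by positivity) (by positivity) (by simp) ?_
    intro h0
    right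
    have : Bs.length = 0 := by omega
    exact List.eq_nil_of_length_eq_zero this
  have hApw : As.Pairwise (fun x y => y ≤ x) :=
    PySem.List.sorted_pairwise_rev (xs := A) (key := fun x => x)
  have hBpw : Bs.Pairwise (fun x y => y ≤ x) :=
    PySem.List.sorted_pairwise_rev (xs := B) (key := fun x => x)
  have take_pw : (As.take n.toNat).Pairwise (fun x y => y ≤ x) :=
    List.Pairwise.sublist (List.take_sublist _ _) hApw
  have htlen : ((As.take n.toNat).length : Int) = n := by
    simp only [List.length_take]
    omega
  have hslice : PySem.List.slice As none (some n) = As.take n.toNat :=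
    PySem.List.slice_to _ (by positivity)
  rw [hL, pvLoopB_eq_pvG As n hnA Bs 0 0 (le_refl 0) (by positivity)]
  simp only [Int.toNat_zero, List.drop_zero]
  rw [pvG_eq_pvM _ _ take_pw, pvM_eq_mp _ _ 0 (le_refl 0), hslice,
    pvSorted_eq_merge _ _ take_pw hBpw, pvFold_mp _ 0 0 (le_refl 0), htlen]
  have hmp := pvMp_nonpos (pvMerge (As.take n.toNat) Bs)
  omega
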